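-- pv_equiv track=rewrite | github.com/pnphan/tropopause | meng2021replication.py | find_pair_in_ranges
-- ===== SOURCE A (Python) =====
-- def find_pair_in_ranges(numbers, range1, range2, range3):
--     """
--     Finds a pair of numbers where one is in range1 and the other in range2.
--
--     Args:
--         numbers (list): List of numbers to search.
--         range1 (tuple): A tuple (min1, max1) defining the first range.
--         range2 (tuple): A tuple (min2, max2) defining the second range.
--
--     Returns:
--         tuple: A pair of numbers (num1, num2) if found, otherwise None.
--     """
--     in_range1 = [num for num in numbers if range1[0] <= num <= range1[1]]
--     in_range2 = [num for num in numbers if range2[0] <= num <= range2[1] or range3[0] <= num <= range3[1]]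
--
--     for num1 in in_range1:
--         for num2 in in_range2:
--             if num1 != num2:  # Ensure they are not the same number
--                 return (num1, num2)
--
--     return None
-- ===== SOURCE B (Python) =====
-- def find_pair_in_ranges(numbers, range1, range2, range3):
--     """Single pass: track the first in-range1 value, the first in-range1 value
--     differing from it, and the same two for range2/range3; decide from those."""
--     f1 = f1d = f2 = f2d = None
--     for num in numbers:
--         if range1[0] <= num <= range1[1]:
--             if f1 is None:
--                 f1 = num
--             elif f1d is None and num != f1:
--                 f1d = num
--         if range2[0] <= num <= range2[1] or range3[0] <= num <= range3[1]:
--             if f2 is None: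
--                 f2 = num
--             elif f2d is None and num != f2:
--                 f2d = num
--     if f1 is None or f2 is None:
--         return None
--     if f2 != f1:
--         return (f1, f2)
--     if f2d is not None:
--         return (f1, f2d)
--     if f1d is not None:
--         return (f1d, f2)
--     return None
-- ===== Notes on version B (the rewrite author's own statement) =====
-- stated objective: faster
-- what changed: Replaced the two filtered lists and the nested scan by a single pass that tracks only the first in-range1 value, the first differing in-range1 value, and the same two for range2/range3, then decides the answer from those four values.
import Mathlib
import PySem

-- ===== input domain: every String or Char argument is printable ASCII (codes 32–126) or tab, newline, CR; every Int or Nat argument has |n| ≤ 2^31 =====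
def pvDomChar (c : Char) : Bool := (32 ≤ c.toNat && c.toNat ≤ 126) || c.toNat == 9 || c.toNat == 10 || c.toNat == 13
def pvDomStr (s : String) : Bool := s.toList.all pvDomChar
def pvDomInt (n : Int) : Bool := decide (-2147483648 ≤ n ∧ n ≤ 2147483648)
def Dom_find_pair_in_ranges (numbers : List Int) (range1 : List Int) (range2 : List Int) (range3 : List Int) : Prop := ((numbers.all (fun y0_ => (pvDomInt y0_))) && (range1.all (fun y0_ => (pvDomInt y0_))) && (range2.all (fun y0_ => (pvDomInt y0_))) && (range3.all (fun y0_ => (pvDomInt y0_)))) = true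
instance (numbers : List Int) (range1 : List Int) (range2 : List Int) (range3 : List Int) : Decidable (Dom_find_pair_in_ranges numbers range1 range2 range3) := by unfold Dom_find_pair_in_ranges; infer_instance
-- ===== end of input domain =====

-- B replaces A's nested scan over two filtered lists by one linear pass keeping four
-- running values; objective: faster (O(n) instead of O(n^2)).

-- ===== PORT A =====
-- index access `r[i]`; Pre_ guarantees every access Python performs is in range,
-- so the default 0 is never the value Python would have raised on (exact on Pre_)
def pvGetI (r : List Int) (i : Int) : Int := (PySem.List.pyGet? r i).getD 0

-- `range1[0] <= num <= range1[1]` (&& short-circuits like Python's chained comparison)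
def pvIn1 (range1 : List Int) (num : Int) : Bool :=
  decide (pvGetI range1 0 ≤ num) && decide (num ≤ pvGetI range1 1)

-- `range2[0] <= num <= range2[1] or range3[0] <= num <= range3[1]`
def pvIn2 (range2 : List Int) (range3 : List Int) (num : Int) : Bool :=
  (decide (pvGetI range2 0 ≤ num) && decide (num ≤ pvGetI range2 1)) ||
  (decide (pvGetI range3 0 ≤ num) && decide (num ≤ pvGetI range3 1))

-- inner `for num2 in in_range2` loop
def fpirInner (num1 : Int) : List Int → Option (List Int)
  | [] => none
  | num2 :: rest => if num1 ≠ num2 then some [num1, num2] else fpirInner num1 rest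

-- outer `for num1 in in_range1` loop
def fpirOuter (in2 : List Int) : List Int → Option (List Int)
  | [] => none
  | num1 :: rest =>
    match fpirInner num1 in2 with
    | some p => some p
    | none => fpirOuter in2 rest

def find_pair_in_ranges (numbers : List Int) (range1 : List Int) (range2 : List Int) (range3 : List Int) : Option (List Int) :=
  let in_range1 := numbers.filter (fun num => pvIn1 range1 num)
  let in_range2 := numbers.filter (fun num => pvIn2 range2 range3 num)
  fpirOuter in_range2 in_range1

-- ===== PORT B =====
-- update one (first value, first differing value) pair with a new in-range element
def fpirUpd : Option Int × Option Int → Int → Option Int × Option Int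
  | (none, fd), num => (some num, fd)
  | (some a, none), num => if num ≠ a then (some a, some num) else (some a, none)
  | (some a, some d), _ => (some a, some d)

-- one iteration of Source B's single loop over `numbers`, state ((f1,f1d),(f2,f2d))
def fpirStep (range1 : List Int) (range2 : List Int) (range3 : List Int)
    (st : (Option Int × Option Int) × (Option Int × Option Int)) (num : Int) :
    (Option Int × Option Int) × (Option Int × Option Int) :=
  (if pvIn1 range1 num then fpirUpd st.1 num else st.1,
   if pvIn2 range2 range3 num then fpirUpd st.2 num else st.2)

def find_pair_in_ranges_alt (numbers : List Int) (range1 : List Int) (range2 : List Int) (range3 : List Int) : Option (List Int) :=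
  match numbers.foldl (fpirStep range1 range2 range3) ((none, none), (none, none)) with
  | ((f1, f1d), (f2, f2d)) =>
    match f1, f2 with
    | none, _ => none
    | _, none => none
    | some a, some b =>
      if b ≠ a then some [a, b]
      else
        match f2d with
        | some d => some [a, d]
        | none =>
          match f1d with
          | some c => some [c, b]
          | none => none

-- ===== PRECONDITION & SPEC =====
-- Pre_ excludes exactly the inputs where Python A raises an IndexError: a range list
-- too short for an index the evaluation actually reaches (Python's chained comparison
-- and `or` short-circuit, so a 0/1-element range list is safe when no number reaches
-- its missing index).
def Pre_find_pair_in_ranges (numbers : List Int) (range1 : List Int) (range2 : List Int) (range3 : List Int) : Prop :=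
  numbers = [] ∨
    ((2 ≤ range1.length ∨ (range1.length = 1 ∧ ∀ n ∈ numbers, ¬ (range1.getD 0 0 ≤ n))) ∧
     (2 ≤ range2.length ∨ (range2.length = 1 ∧ ∀ n ∈ numbers, ¬ (range2.getD 0 0 ≤ n))) ∧
     ((∀ n ∈ numbers, 2 ≤ range2.length ∧ range2.getD 0 0 ≤ n ∧ n ≤ range2.getD 1 0) ∨
      2 ≤ range3.length ∨
      (range3.length = 1 ∧ ∀ n ∈ numbers,
        (2 ≤ range2.length ∧ range2.getD 0 0 ≤ n ∧ n ≤ range2.getD 1 0) ∨ ¬ (range3.getD 0 0 ≤ n))))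

instance (numbers : List Int) (range1 : List Int) (range2 : List Int) (range3 : List Int) : Decidable (Pre_find_pair_in_ranges numbers range1 range2 range3) := by unfold Pre_find_pair_in_ranges; infer_instance

def pvWitness_find_pair_in_ranges : List Int × List Int × List Int × List Int :=
  ([1, 5, 9], [0, 3], [4, 6], [8, 10])

def Spec_find_pair_in_ranges (numbers : List Int) (range1 : List Int) (range2 : List Int) (range3 : List Int) (out : Option (List Int)) : Prop := out = find_pair_in_ranges_alt numbers range1 range2 range3
instance (numbers : List Int) (range1 : List Int) (range2 : List Int) (range3 : List Int) (out : Option (List Int)) : Decidable (Spec_find_pair_in_ranges numbers range1 range2 range3 out) := by unfold Spec_find_pair_in_ranges; infer_instance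

-- ===== CLAIM (what is proved, stated in full; the proofs are below) =====
def Claim_equal_find_pair_in_ranges : Prop := ∀ (numbers : List Int) (range1 : List Int) (range2 : List Int) (range3 : List Int), Dom_find_pair_in_ranges numbers range1 range2 range3 → Pre_find_pair_in_ranges numbers range1 range2 range3 → Spec_find_pair_in_ranges numbers range1 range2 range3 (find_pair_in_ranges numbers range1 range2 range3)

-- ===== LEMMAS AND PROOFS =====

-- the single fold splits into two independent folds over the two filtered lists
theorem fpir_fold_split (range1 range2 range3 : List Int) :
    ∀ (numbers : List Int) (s1 s2 : Option Int × Option Int),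
      numbers.foldl (fpirStep range1 range2 range3) (s1, s2) =
        ((numbers.filter (fun num => pvIn1 range1 num)).foldl fpirUpd s1,
         (numbers.filter (fun num => pvIn2 range2 range3 num)).foldl fpirUpd s2) := by
  intro numbers
  induction numbers with
  | nil => intro s1 s2; rfl
  | cons x t ih =>
    intro s1 s2
    simp only [List.foldl_cons, List.filter_cons]
    by_cases h1 : pvIn1 range1 x = true <;> by_cases h2 : pvIn2 range2 range3 x = true <;>
      simp [fpirStep, h1, h2, ih]

theorem fpirUpd_absorb (a d : Int) : ∀ l : List Int,
    l.foldl fpirUpd (some a, some d) = (some a, some d) := by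
  intro l; induction l with
  | nil => rfl
  | cons x t ih => simpa [fpirUpd] using ih

theorem fpirUpd_some_none (a : Int) : ∀ l : List Int,
    l.foldl fpirUpd (some a, none) = (some a, l.find? (fun x => decide (x ≠ a))) := by
  intro l; induction l with
  | nil => rfl
  | cons x t ih =>
    by_cases h : x = a
    · simp [fpirUpd, h, ih]
    · simp [fpirUpd, h, fpirUpd_absorb]

theorem fpirUpd_char : ∀ l : List Int,
    l.foldl fpirUpd (none, none) =
      (match l with
       | [] => (none, none)
       | a :: t => (some a, t.find? (fun x => decide (x ≠ a)))) := by
  intro l; cases l with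
  | nil => rfl
  | cons a t => simp [fpirUpd, fpirUpd_some_none]

theorem fpirInner_char (a : Int) : ∀ l : List Int,
    fpirInner a l = (l.find? (fun x => decide (x ≠ a))).map (fun b => [a, b]) := by
  intro l; induction l with
  | nil => rfl
  | cons x t ih =>
    by_cases h : a = x
    · subst h
      rw [List.find?_cons_of_neg (by simp)]
      simpa [fpirInner] using ih
    · rw [List.find?_cons_of_pos (by simpa using Ne.symm h)]
      simp [fpirInner, h]

theorem fpirOuter_const (a : Int) (in2 : List Int) (hne : in2 ≠ [])
    (hall : ∀ x ∈ in2, x = a) : ∀ t : List Int,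
    fpirOuter in2 t = (t.find? (fun x => decide (x ≠ a))).map (fun c => [c, a]) := by
  obtain ⟨b, t2, rfl⟩ := List.exists_cons_of_ne_nil hne
  have hb : b = a := hall b (by simp)
  have ht2 : t2.find? (fun x => decide (x ≠ a)) = none := by
    rw [List.find?_eq_none]; intro x hx; simpa using hall x (by simp [hx])
  subst hb
  intro t; induction t with
  | nil => rfl
  | cons c t' ih =>
    by_cases h : c = b
    · subst h
      have hi : fpirInner c (c :: t2) = none := by
        rw [fpirInner_char, List.find?_cons_of_neg (by simp), ht2]; rfl
      rw [List.find?_cons_of_neg (by simp)]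
      simpa [fpirOuter, hi] using ih
    · have hi : fpirInner c (b :: t2) = some [c, b] := by
        rw [fpirInner_char, List.find?_cons_of_pos (by simpa using Ne.symm h)]; rfl
      rw [List.find?_cons_of_pos (by simpa using h)]
      simp [fpirOuter, hi]

theorem fpir_key : ∀ (in1 in2 : List Int),
    fpirOuter in2 in1 =
      (match in1, in2 with
       | [], _ => none
       | _ :: _, [] => none
       | a :: t1, b :: t2 =>
         if b ≠ a then some [a, b]
         else
           match t2.find? (fun x => decide (x ≠ b)) with
           | some d => some [a, d]
           | none =>
             match t1.find? (fun x => decide (x ≠ a)) with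
             | some c => some [c, b]
             | none => none) := by
  intro in1 in2
  cases in1 with
  | nil => rfl
  | cons a t1 =>
    cases in2 with
    | nil =>
      simp only [fpirOuter, fpirInner_char]
      induction t1 with
      | nil => rfl
      | cons c t' ih => simpa [fpirOuter, fpirInner_char] using ih
    | cons b t2 =>
      by_cases hba : b = a
      · subst hba
        have hhead : fpirInner b (b :: t2) =
            Option.map (fun d => [b, d]) (t2.find? (fun x => decide (x ≠ b))) := by
          rw [fpirInner_char, List.find?_cons_of_neg (by simp)]
        cases hfd : t2.find? (fun x => decide (x ≠ b)) with
        | some d =>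
          rw [show (fpirOuter (b :: t2) (b :: t1)) =
                (match fpirInner b (b :: t2) with
                 | some p => some p
                 | none => fpirOuter (b :: t2) t1) from rfl,
              hhead, hfd]
          simp only [ne_eq, decide_not] at hfd
          simp [hfd]
        | none =>
          have hall : ∀ x ∈ (b :: t2), x = b := by
            intro x hx
            rcases List.mem_cons.mp hx with h | h
            · exact h
            · have := List.find?_eq_none.mp hfd x h; simpa using this
          rw [show (fpirOuter (b :: t2) (b :: t1)) =
                (match fpirInner b (b :: t2) with
                 | some p => some p
                 | none => fpirOuter (b :: t2) t1) from rfl,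
              hhead, hfd, fpirOuter_const b (b :: t2) (by simp) hall t1,
]
          simp only [ne_eq, decide_not] at hfd
          simp [hfd]
          cases List.find? (fun x => !decide (x = b)) t1 <;> rfl
      · have hi : fpirInner a (b :: t2) = some [a, b] := by
          rw [fpirInner_char, List.find?_cons_of_pos (by simpa using hba)]; rfl
        simp [fpirOuter, hi, hba]

theorem fpir_main (numbers range1 range2 range3 : List Int) :
    find_pair_in_ranges numbers range1 range2 range3 =
      find_pair_in_ranges_alt numbers range1 range2 range3 := by
  unfold find_pair_in_ranges find_pair_in_ranges_alt
  rw [fpir_fold_split, fpirUpd_char, fpirUpd_char, fpir_key]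
  cases numbers.filter (fun num => pvIn1 range1 num) with
  | nil => rfl
  | cons a t1 =>
    cases numbers.filter (fun num => pvIn2 range2 range3 num) with
    | nil => rfl
    | cons b t2 => rfl

-- ===== VERDICT (by name: the statement is the Claim_ definition above) =====
theorem find_pair_in_ranges_spec : Claim_equal_find_pair_in_ranges := by
  intro numbers range1 range2 range3 _ _
  exact fpir_main numbers range1 range2 range3
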